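-- pv_equiv track=rewrite | github.com/Liquid-democracy/liquid-voteagain | voteagain/measurements_tally.py | _find_cycle_nodes
-- ===== SOURCE A (Python) =====
-- def _find_cycle_nodes(delegation_edges):
--     """Return all voter vids that belong to a directed cycle."""
--
--     cycle_nodes = set()
--     state = {}  # 0=unvisited, 1=visiting, 2=done
--     stack = []
--     stack_pos = {}
--
--     def depth_first_search(node):
--         state[node] = 1
--         stack_pos[node] = len(stack)
--         stack.append(node)
--
--         nxt = delegation_edges.get(node)
--         if nxt is not None:
--             nxt_state = state.get(nxt, 0)
--             if nxt_state == 0: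
--                 depth_first_search(nxt)
--             elif nxt_state == 1:
--                 cycle_start = stack_pos[nxt]
--                 cycle_nodes.update(stack[cycle_start:])
--
--         stack.pop()
--         stack_pos.pop(node, None)
--         state[node] = 2
--
--     for node in delegation_edges:
--         if state.get(node, 0) == 0:
--             depth_first_search(node)
--
--     return cycle_nodes
-- ===== SOURCE B (Python) =====
-- def _find_cycle_nodes(delegation_edges):
--     """Return all voter vids that belong to a directed cycle."""
--
--     cycle_nodes = set()
--     done = set()
--
--     for start in delegation_edges:
--         if start in done:
--             continue
--         pos = {}
--         path = []
--         node = start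
--         while node is not None and node not in done and node not in pos:
--             pos[node] = len(path)
--             path.append(node)
--             node = delegation_edges.get(node)
--         if node is not None and node in pos:
--             cycle_nodes.update(path[pos[node]:])
--         done.update(path)
--
--     return cycle_nodes
-- ===== Notes on version B (the rewrite author's own statement) =====
-- stated objective: alternative
-- what changed: Replaces A's recursive three-colour DFS (nested function, shared state dict with 0/1/2 colours, explicit stack plus stack_pos dict, unwinding after each call) by an iterative successor-chain walk: from each not-yet-finished key, follow delegation_edges.get(...) recording each node's position on the current chain until hitting None, a finished node, or a node already on the chain (whose recorded position yields the cycle slice), then mark the whole chain finished; no recursion and no per-node unwinding.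
import Mathlib
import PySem

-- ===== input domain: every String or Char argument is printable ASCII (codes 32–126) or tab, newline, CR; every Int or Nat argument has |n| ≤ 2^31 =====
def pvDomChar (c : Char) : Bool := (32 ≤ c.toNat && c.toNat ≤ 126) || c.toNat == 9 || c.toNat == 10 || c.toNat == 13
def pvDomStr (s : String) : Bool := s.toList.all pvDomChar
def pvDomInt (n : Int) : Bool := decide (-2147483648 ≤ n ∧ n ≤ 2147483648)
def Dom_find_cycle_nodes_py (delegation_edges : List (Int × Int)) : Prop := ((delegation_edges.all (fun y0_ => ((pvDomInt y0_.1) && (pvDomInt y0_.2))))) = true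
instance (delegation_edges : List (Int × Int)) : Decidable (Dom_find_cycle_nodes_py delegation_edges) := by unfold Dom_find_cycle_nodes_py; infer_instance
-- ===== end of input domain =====

-- B replaces A's recursive three-colour DFS by an iterative successor-chain walk
-- (per unvisited start: follow edges recording positions until None / a finished node /
-- a node on the current chain); same return value, no recursion.

-- ===== PORT A =====
-- A's inner `depth_first_search`; the Nat argument is fuel making the recursion
-- structural (never exhausted with the fuel supplied below).
-- State tuple mirrors A's shared mutable state: (cycle_nodes, state, stack, stack_pos);
-- state values: 1 = visiting, 2 = done (0 is encoded by absence, as `state.get(nxt, 0)` reads it).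
def pvDfsA (edges : PySem.Dict Int Int) :
    Nat → PySem.Set Int → PySem.Dict Int Int → List Int → PySem.Dict Int Int → Int →
      PySem.Set Int × PySem.Dict Int Int × List Int × PySem.Dict Int Int
  | 0, cyc, state, stack, spos, _ => (cyc, state, stack, spos)  -- fuel guard only
  | fuel+1, cyc, state, stack, spos, node =>
    let state := state.insert node 1
    let spos := spos.insert node (stack.length : Int)
    let stack := stack ++ [node]
    let r :=
      match edges.get? node with
      | none => (cyc, state, stack, spos)
      | some nxt =>
        let nxtState := state.getD nxt 0
        if nxtState = 0 then pvDfsA edges fuel cyc state stack spos nxt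
        else if nxtState = 1 then
          -- stack_pos[nxt]: key present here (nxt has state 1), so the default is never read
          let cstart := spos.getD nxt 0
          (PySem.Set.update cyc (PySem.List.slice stack (some cstart) none), state, stack, spos)
        else (cyc, state, stack, spos)
    -- stack.pop(); stack_pos.pop(node, None); state[node] = 2
    (r.1, r.2.1.insert node 2, r.2.2.1.dropLast, r.2.2.2.erase node)

-- the body of A's `for node in delegation_edges` loop
def pvStepA (edges : PySem.Dict Int Int) (fuel : Nat)
    (acc : PySem.Set Int × PySem.Dict Int Int × List Int × PySem.Dict Int Int) (node : Int) :
    PySem.Set Int × PySem.Dict Int Int × List Int × PySem.Dict Int Int :=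
  if acc.2.1.getD node 0 = 0 then
    pvDfsA edges fuel acc.1 acc.2.1 acc.2.2.1 acc.2.2.2 node
  else acc

def find_cycle_nodes_py (delegation_edges : List (Int × Int)) : List Int :=
  let edges := PySem.Dict.ofList delegation_edges
  (edges.keys.foldl (pvStepA edges (edges.keys.length + 1))
    ((PySem.Set.empty : PySem.Set Int), (PySem.Dict.empty : PySem.Dict Int Int),
     ([] : List Int), (PySem.Dict.empty : PySem.Dict Int Int))).1

-- ===== PORT B =====
-- B's `while` loop: walk the successor chain from `node`, recording positions, until
-- node is None, already finished (`done`), or already on the current chain (`pos`).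
-- Returns (pos, path, node) as left by the loop; the Nat argument is fuel only.
def pvWalkB (edges : PySem.Dict Int Int) (done : PySem.Set Int) :
    Nat → PySem.Dict Int Int → List Int → Option Int →
      PySem.Dict Int Int × List Int × Option Int
  | 0, pos, path, node => (pos, path, node)  -- fuel guard only
  | fuel+1, pos, path, node =>
    match node with
    | none => (pos, path, none)
    | some n =>
      if done.contains n || pos.contains n then (pos, path, some n)
      else pvWalkB edges done fuel (pos.insert n (path.length : Int)) (path ++ [n]) (edges.get? n)

-- the body of B's `for start in delegation_edges` loop
def pvStepB (edges : PySem.Dict Int Int) (fuel : Nat)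
    (acc : PySem.Set Int × PySem.Set Int) (start : Int) : PySem.Set Int × PySem.Set Int :=
  if acc.2.contains start then acc
  else
    let w := pvWalkB edges acc.2 fuel PySem.Dict.empty [] (some start)
    let cyc :=
      match w.2.2 with
      | some m =>
        if w.1.contains m then
          -- path[pos[node]:]: key present here, so the default is never read
          PySem.Set.update acc.1 (PySem.List.slice w.2.1 (some (w.1.getD m 0)) none)
        else acc.1
      | none => acc.1
    (cyc, PySem.Set.update acc.2 w.2.1)

def find_cycle_nodes_py_alt (delegation_edges : List (Int × Int)) : List Int :=
  let edges := PySem.Dict.ofList delegation_edges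
  (edges.keys.foldl (pvStepB edges (edges.keys.length + 1))
    ((PySem.Set.empty : PySem.Set Int), (PySem.Set.empty : PySem.Set Int))).1

-- ===== PRECONDITION & SPEC =====
def Spec_find_cycle_nodes_py (delegation_edges : List (Int × Int)) (out : List Int) : Prop := out = find_cycle_nodes_py_alt delegation_edges
instance (delegation_edges : List (Int × Int)) (out : List Int) : Decidable (Spec_find_cycle_nodes_py delegation_edges out) := by unfold Spec_find_cycle_nodes_py; infer_instance

-- ===== CLAIM (what is proved, stated in full; the proofs are below) =====
def Claim_equal_find_cycle_nodes_py : Prop := ∀ (delegation_edges : List (Int × Int)), Dom_find_cycle_nodes_py delegation_edges → Spec_find_cycle_nodes_py delegation_edges (find_cycle_nodes_py delegation_edges)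

-- ===== LEMMAS AND PROOFS =====

-- A's `state` dict seen through B's eyes: a node is "visiting" (1) iff it is on the
-- current chain (`pos`), "done" (2) iff it is in B's `done` set, otherwise absent (0).
def pvStRel (state : PySem.Dict Int Int) (done : PySem.Set Int) (pos : PySem.Dict Int Int) : Prop :=
  ∀ x : Int, state.getD x 0 = (if pos.contains x then 1 else if done.contains x then 2 else 0)

-- how B's loop body updates cycle_nodes, as a function of the walk's final state
def pvCycStep (cyc : PySem.Set Int) (w : PySem.Dict Int Int × List Int × Option Int) : PySem.Set Int :=
  match w.2.2 with
  | some m =>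
    if w.1.contains m then PySem.Set.update cyc (PySem.List.slice w.2.1 (some (w.1.getD m 0)) none)
    else cyc
  | none => cyc

lemma pv_erase_insert (d : PySem.Dict Int Int) (k : Int) (v : Int) (h : d.contains k = false) :
    (d.insert k v).erase k = d := by
  have hmem : ∀ p ∈ d.items, (!p.1 == k) = true := by
    intro p hp
    simp only [PySem.Dict.contains, List.any_eq_false] at h
    simpa using h p hp
  apply PySem.Dict.ext
  simp [PySem.Dict.insert, PySem.Dict.erase, h, List.filter_append, List.filter_eq_self.mpr hmem]

lemma pvWalkB_none (edges : PySem.Dict Int Int) (done : PySem.Set Int) (fuel : Nat)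
    (pos : PySem.Dict Int Int) (path : List Int) :
    pvWalkB edges done fuel pos path none = (pos, path, none) := by
  cases fuel <;> rfl

lemma pvWalkB_stop (edges : PySem.Dict Int Int) (done : PySem.Set Int) (fuel : Nat)
    (pos : PySem.Dict Int Int) (path : List Int) (m : Int)
    (h : (done.contains m || pos.contains m) = true) :
    pvWalkB edges done fuel pos path (some m) = (pos, path, some m) := by
  cases fuel with
  | zero => rfl
  | succ f => simp only [pvWalkB, h, if_true]

-- the walk only extends the path
lemma pvWalkB_path_prefix (edges : PySem.Dict Int Int) (done : PySem.Set Int) :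
    ∀ (fuel : Nat) (pos : PySem.Dict Int Int) (path : List Int) (node : Option Int),
    path <+: (pvWalkB edges done fuel pos path node).2.1 := by
  intro fuel
  induction fuel with
  | zero => intro pos path node; exact List.prefix_refl _
  | succ f ih =>
    intro pos path node
    cases node with
    | none => exact List.prefix_refl _
    | some n =>
      simp only [pvWalkB]
      by_cases h : (done.contains n || pos.contains n) = true
      · rw [if_pos h]
      · rw [if_neg h]
        exact ((path.prefix_append [n]).trans (ih _ _ _))

lemma pv_contains_update (s : PySem.Set Int) (l : List Int) (x : Int) :
    (PySem.Set.update s l).contains x = (s.contains x || l.contains x) := by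
  rw [Bool.eq_iff_iff]
  simp [PySem.Set.mem_update]

-- pushing a node onto the chain preserves the state relation
lemma pv_strel_push (state : PySem.Dict Int Int) (done : PySem.Set Int) (pos : PySem.Dict Int Int)
    (n : Int) (v : Int) (hrel : pvStRel state done pos) :
    pvStRel (state.insert n 1) done (pos.insert n v) := by
  intro x
  rw [PySem.Dict.getD_insert, PySem.Dict.contains_insert]
  by_cases hx : x = n
  · have hb : (x == n) = true := by simp [hx]
    rw [if_pos hx, hb, Bool.true_or, if_pos rfl]
  · have hb : (x == n) = false := by simp [hx]
    rw [if_neg hx, hb, Bool.false_or]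
    exact hrel x

-- popping the root of the chain: it becomes done together with the nodes added above it
lemma pv_strel_pop (st : PySem.Dict Int Int) (done : PySem.Set Int) (pos : PySem.Dict Int Int)
    (n : Int) (v : Int) (t : List Int)
    (hrel : pvStRel st (PySem.Set.update done t) (pos.insert n v))
    (hpn : pos.contains n = false) :
    pvStRel (st.insert n 2) (PySem.Set.update done (n :: t)) pos := by
  intro x
  rw [PySem.Dict.getD_insert]
  by_cases hx : x = n
  · subst hx
    have hc : (PySem.Set.update done (x :: t)).contains x = true := by
      rw [pv_contains_update]; simp
    simp [hpn]
  · rw [if_neg hx]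
    have h1 := hrel x
    rw [PySem.Dict.contains_insert] at h1
    have hb : (x == n) = false := by simp [hx]
    rw [hb, Bool.false_or] at h1
    rw [h1, pv_contains_update, pv_contains_update]
    have hcons : (n :: t).contains x = t.contains x := by simp [hx]
    rw [hcons]

-- Main simulation lemma: A's depth_first_search from a fresh node n, with stack = path
-- and stack_pos = pos, produces exactly the cycle update B computes from its walk,
-- restores stack and stack_pos, and leaves `state` related to done ∪ (new chain nodes).
lemma pv_dfs_walk (edges : PySem.Dict Int Int) :
    ∀ (fuel : Nat) (cyc : PySem.Set Int) (state : PySem.Dict Int Int) (done : PySem.Set Int)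
      (pos : PySem.Dict Int Int) (path : List Int) (n : Int),
    pvStRel state done pos →
    done.contains n = false → pos.contains n = false →
    (edges.keys.filter (fun k => !(done.contains k) && !(pos.contains k))).length < fuel →
    (pvDfsA edges fuel cyc state path pos n).1
        = pvCycStep cyc (pvWalkB edges done fuel pos path (some n))
    ∧ (pvDfsA edges fuel cyc state path pos n).2.2.1 = path
    ∧ (pvDfsA edges fuel cyc state path pos n).2.2.2 = pos
    ∧ pvStRel (pvDfsA edges fuel cyc state path pos n).2.1
        (PySem.Set.update done ((pvWalkB edges done fuel pos path (some n)).2.1.drop path.length))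
        pos := by
  intro fuel
  induction fuel with
  | zero => intro _ _ _ _ _ _ _ _ _ hlt; omega
  | succ f ih =>
    intro cyc state done pos path n hrel hdn hpn hlt
    have hcond : (done.contains n || pos.contains n) = false := by rw [hdn, hpn]; rfl
    have hwalk1 : pvWalkB edges done (f+1) pos path (some n)
        = pvWalkB edges done f (pos.insert n (path.length : Int)) (path ++ [n]) (edges.get? n) := by
      simp only [pvWalkB, hcond]; rfl
    have hupd0 : PySem.Set.update done ([] : List Int) = done := rfl
    have hdrop1 : (path ++ [n]).drop path.length = [n] := by simp
    rcases hv : edges.get? n with _ | nxt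
    · -- delegation_edges.get(node) is None: the chain ends at n
      have hwalk : pvWalkB edges done (f+1) pos path (some n)
          = (pos.insert n (path.length : Int), path ++ [n], none) := by
        rw [hwalk1, hv, pvWalkB_none]
      simp only [pvDfsA, hv, hwalk]
      refine ⟨rfl, List.dropLast_concat, pv_erase_insert pos n (path.length : Int) hpn, ?_⟩
      rw [hdrop1]
      exact pv_strel_pop (state.insert n 1) done pos n (path.length : Int) [] (by rw [hupd0]; exact pv_strel_push _ _ _ _ _ hrel) hpn
    · -- delegation_edges.get(node) is some nxt
      have hst1 : (state.insert n 1).getD nxt 0 = if nxt = n then 1 else state.getD nxt 0 :=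
        PySem.Dict.getD_insert _ _ _ _ _
      by_cases hvis : nxt = n ∨ pos.contains nxt = true
      · -- nxt is "visiting": on the current chain; a cycle is recorded
        have hp1 : (pos.insert n (path.length : Int)).contains nxt = true := by
          rw [PySem.Dict.contains_insert]
          rcases hvis with h | h
          · simp [h]
          · simp [h]
        have hns : (state.insert n 1).getD nxt 0 = 1 := by
          rw [hst1]
          rcases hvis with h | h
          · simp [h]
          · rw [if_neg (fun hh => by rw [hh, hpn] at h; exact Bool.false_ne_true h)]
            rw [hrel nxt, if_pos h]
        have hwalk : pvWalkB edges done (f+1) pos path (some n)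
            = (pos.insert n (path.length : Int), path ++ [n], some nxt) := by
          rw [hwalk1, hv, pvWalkB_stop]
          rw [hp1, Bool.or_true]
        simp only [pvDfsA, hv, hns, hwalk]
        refine ⟨by simp [pvCycStep, hp1], List.dropLast_concat,
          pv_erase_insert pos n (path.length : Int) hpn, ?_⟩
        rw [hdrop1]
        exact pv_strel_pop (state.insert n 1) done pos n (path.length : Int) [] (by rw [hupd0]; exact pv_strel_push _ _ _ _ _ hrel) hpn
      · have hne : nxt ≠ n := fun h => hvis (Or.inl h)
        have hpnx : pos.contains nxt = false := by
          cases h : pos.contains nxt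
          · rfl
          · exact absurd (Or.inr h) hvis
        by_cases hdnx : done.contains nxt = true
        · -- nxt is "done": nothing recorded
          have hns : (state.insert n 1).getD nxt 0 = 2 := by
            rw [hst1, if_neg hne, hrel nxt, hpnx, hdnx]; rfl
          have hp1 : (pos.insert n (path.length : Int)).contains nxt = false := by
            rw [PySem.Dict.contains_insert]
            simp [hne, hpnx]
          have hwalk : pvWalkB edges done (f+1) pos path (some n)
              = (pos.insert n (path.length : Int), path ++ [n], some nxt) := by
            rw [hwalk1, hv, pvWalkB_stop]
            rw [hdnx, Bool.true_or]
          simp only [pvDfsA, hv, hns, hwalk]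
          refine ⟨by simp [pvCycStep, hp1], List.dropLast_concat,
            pv_erase_insert pos n (path.length : Int) hpn, ?_⟩
          rw [hdrop1]
          exact pv_strel_pop (state.insert n 1) done pos n (path.length : Int) [] (by rw [hupd0]; exact pv_strel_push _ _ _ _ _ hrel) hpn
        · -- nxt is fresh: A recurses, B's walk continues
          rw [Bool.not_eq_true] at hdnx
          have hns : (state.insert n 1).getD nxt 0 = 0 := by
            rw [hst1, if_neg hne, hrel nxt, hpnx, hdnx]; rfl
          -- fuel decreases: n is a key that was fresh and no longer is
          have hkey : n ∈ edges.keys := by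
            rw [← PySem.Dict.contains_iff_mem_keys, PySem.Dict.contains_eq_isSome_get?, hv]
            rfl
          have hlt' : (edges.keys.filter (fun k => !(done.contains k)
              && !((pos.insert n (path.length : Int)).contains k))).length
              < (edges.keys.filter (fun k => !(done.contains k) && !(pos.contains k))).length := by
            have hsub : List.Sublist
                (edges.keys.filter (fun k => !(done.contains k)
                  && !((pos.insert n (path.length : Int)).contains k)))
                (edges.keys.filter (fun k => !(done.contains k) && !(pos.contains k))) := by
              apply List.monotone_filter_right
              intro a ha
              rw [Bool.and_eq_true] at ha ⊢
              refine ⟨ha.1, ?_⟩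
              have ha2 := ha.2
              rw [PySem.Dict.contains_insert] at ha2
              simp only [Bool.not_eq_true', Bool.or_eq_false_iff] at ha2
              simp [ha2.2]
            have hmem : n ∈ edges.keys.filter (fun k => !(done.contains k) && !(pos.contains k)) := by
              rw [List.mem_filter]
              exact ⟨hkey, by rw [hdn, hpn]; rfl⟩
            have hnmem : n ∉ edges.keys.filter (fun k => !(done.contains k)
                && !((pos.insert n (path.length : Int)).contains k)) := by
              rw [List.mem_filter]
              rintro ⟨-, hh⟩
              rw [PySem.Dict.contains_insert] at hh
              simp at hh
            rcases lt_or_eq_of_le hsub.length_le with hlt2 | heq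
            · exact hlt2
            · rw [hsub.eq_of_length heq] at hnmem
              exact absurd hmem hnmem
          have hih := ih cyc (state.insert n 1) done (pos.insert n (path.length : Int)) (path ++ [n]) nxt
            (pv_strel_push _ _ _ _ _ hrel) hdnx
            (by rw [PySem.Dict.contains_insert]; simp [hne, hpnx])
            (by omega)
          obtain ⟨h1, h2, h3, h4⟩ := hih
          have hwalk : pvWalkB edges done (f+1) pos path (some n)
              = pvWalkB edges done f (pos.insert n (path.length : Int)) (path ++ [n]) (some nxt) := by
            rw [hwalk1, hv]
          -- the inner walk's final path extends path ++ [n]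
          obtain ⟨t, ht⟩ := pvWalkB_path_prefix edges done f
            (pos.insert n (path.length : Int)) (path ++ [n]) (some nxt)
          simp only [pvDfsA, hv, hns, reduceIte, hwalk]
          refine ⟨h1, by rw [h2]; exact List.dropLast_concat, by rw [h3]; exact pv_erase_insert pos n (path.length : Int) hpn, ?_⟩
          rw [← ht] at h4 ⊢
          have hdropn : ((path ++ [n]) ++ t).drop path.length = n :: t := by
            rw [List.append_assoc]
            simp
          have hdrop1' : ((path ++ [n]) ++ t).drop (path ++ [n]).length = t := by simp
          rw [hdropn]
          rw [hdrop1'] at h4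
          exact pv_strel_pop _ done pos n (path.length : Int) t h4 hpn

lemma pv_fold (edges : PySem.Dict Int Int) (fuel : Nat) (hf : edges.keys.length < fuel) :
    ∀ (ks : List Int) (cyc : PySem.Set Int) (state : PySem.Dict Int Int) (done : PySem.Set Int),
    pvStRel state done PySem.Dict.empty →
    (ks.foldl (pvStepA edges fuel) (cyc, state, ([] : List Int), PySem.Dict.empty)).1
      = (ks.foldl (pvStepB edges fuel) (cyc, done)).1 := by
  intro ks
  induction ks with
  | nil => intro cyc state done hrel; rfl
  | cons k ks ih =>
    intro cyc state done hrel
    have hposE : (PySem.Dict.empty : PySem.Dict Int Int).contains k = false := by simp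
    have hsk := hrel k
    rw [hposE] at hsk
    simp only [Bool.false_eq_true, if_false] at hsk
    simp only [List.foldl_cons]
    cases hd : done.contains k with
    | true =>
      rw [hd, if_pos rfl] at hsk
      have hA : pvStepA edges fuel (cyc, state, ([] : List Int), PySem.Dict.empty) k
          = (cyc, state, ([] : List Int), PySem.Dict.empty) := by
        unfold pvStepA
        rw [if_neg (by rw [hsk]; norm_num)]
      have hB : pvStepB edges fuel (cyc, done) k = (cyc, done) := by
        simp only [pvStepB, hd, reduceIte]
      rw [hA, hB]
      exact ih cyc state done hrel
    | false =>
      rw [hd] at hsk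
      simp only [Bool.false_eq_true, if_false] at hsk
      obtain ⟨h1, h2, h3, h4⟩ := pv_dfs_walk edges fuel cyc state done PySem.Dict.empty [] k hrel hd
        hposE (lt_of_le_of_lt (List.length_filter_le _ _) hf)
      have hA : pvStepA edges fuel (cyc, state, ([] : List Int), PySem.Dict.empty) k
          = (pvCycStep cyc (pvWalkB edges done fuel PySem.Dict.empty [] (some k)),
             (pvDfsA edges fuel cyc state [] PySem.Dict.empty k).2.1,
             ([] : List Int), PySem.Dict.empty) := by
        unfold pvStepA
        rw [if_pos hsk]
        exact Prod.ext h1 (Prod.ext rfl (Prod.ext h2 h3))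
      have hB : pvStepB edges fuel (cyc, done) k
          = (pvCycStep cyc (pvWalkB edges done fuel PySem.Dict.empty [] (some k)),
             PySem.Set.update done (pvWalkB edges done fuel PySem.Dict.empty [] (some k)).2.1) := by
        simp only [pvStepB, hd]
        rfl
      rw [hA, hB]
      apply ih
      simpa using h4

-- ===== VERDICT (by name: the statement is the Claim_ definition above) =====
theorem find_cycle_nodes_py_spec : Claim_equal_find_cycle_nodes_py := by
  intro delegation_edges _
  unfold Spec_find_cycle_nodes_py find_cycle_nodes_py find_cycle_nodes_py_alt
  exact pv_fold _ _ (Nat.lt_succ_self _) _ PySem.Set.empty PySem.Dict.empty PySem.Set.empty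
    (by intro x; simp [PySem.Dict.getD_empty, PySem.Dict.contains_empty, PySem.Set.empty])
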